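-- pv_equiv track=rewrite | github.com/Sonia-gu/measure | course_work_measure_code/fortex.py | cicle_search
-- ===== SOURCE A (Python) =====
-- def dfs(adjacency, vertex, visited = None, path = None):
--     if visited is None:
--         visited = set()
--     if path is None:
--         path = []
--     visited.add(vertex)
--     path.append(vertex)
--     if vertex in adjacency:
--         for neighbor in adjacency[vertex]:
--             if neighbor not in visited:
--                 dfs(adjacency, neighbor, visited, path)
--     return path
--
-- def cicle_search(graph, v):
--     cicle = dict()
--     visited=set()
--     for vi in v:
--         if vi in visited: continue
--         else:
--             cicle[vi] = dfs(graph, vi)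
--             for vj in cicle[vi]: visited.add(vj)
--     return [c for c in cicle.values()]
-- ===== SOURCE B (Python) =====
-- def cicle_search(graph, v):
--     # Iterative DFS with an explicit stack (visited checked at pop time,
--     # neighbors pushed in reversed order => identical preorder), and a plain
--     # list of paths instead of a dict keyed by each root.
--     cycles = []
--     visited = set()
--     for vi in v:
--         if vi in visited:
--             continue
--         path = []
--         seen = set()
--         stack = [vi]
--         while stack:
--             x = stack.pop()
--             if x in seen:
--                 continue
--             seen.add(x)
--             path.append(x)
--             stack.extend(reversed(graph.get(x, [])))
--         cycles.append(path)
--         visited.update(path)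
--     return cycles
-- ===== Notes on version B (the rewrite author's own statement) =====
-- stated objective: idiomatic
-- what changed: Replaces the recursive dfs helper with an iterative explicit-stack DFS (visited checked at pop time, neighbors pushed in reversed order, so the discovery order is identical) and collects the paths in a plain list instead of a dict keyed by each root.
import Mathlib
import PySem

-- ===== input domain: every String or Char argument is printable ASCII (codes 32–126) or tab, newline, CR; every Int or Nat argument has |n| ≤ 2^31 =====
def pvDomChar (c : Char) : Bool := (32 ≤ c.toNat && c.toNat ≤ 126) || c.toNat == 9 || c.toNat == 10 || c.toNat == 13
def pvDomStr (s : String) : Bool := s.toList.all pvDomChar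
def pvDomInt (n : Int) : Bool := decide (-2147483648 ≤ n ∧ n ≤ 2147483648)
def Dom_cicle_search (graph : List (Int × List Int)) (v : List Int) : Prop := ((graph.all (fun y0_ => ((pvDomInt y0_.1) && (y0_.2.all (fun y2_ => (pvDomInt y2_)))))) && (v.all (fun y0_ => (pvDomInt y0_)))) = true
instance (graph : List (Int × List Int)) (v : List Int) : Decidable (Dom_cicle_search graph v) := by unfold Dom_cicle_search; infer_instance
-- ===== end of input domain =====

-- B replaces A's recursive dfs by an iterative stack-based DFS (visited checked at
-- pop time, neighbors pushed in reverse, so the preorder is identical) and collects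
-- the paths in a plain list instead of a dict keyed by each root.

-- ===== PORT A =====
-- Shared dict-access helper: `adjacency[vertex]` / `adjacency.get(vertex, [])` on the
-- dict argument (assoc list → Python dict, so later duplicate keys overwrite earlier).
def pvNbrs (graph : List (Int × List Int)) (x : Int) : List Int :=
  (PySem.Dict.ofList graph).getD x []

-- Termination measure for the DFS recursions: how many dict keys are not yet visited.
def pvUnseen (graph : List (Int × List Int)) (vis : List Int) : Nat :=
  (graph.map Prod.fst).countP (fun k => !vis.contains k)

-- (termination lemmas, cited by the ports' decreasing_by)
theorem pvCountP_lt {l : List Int} {p q : Int → Bool} (himp : ∀ a, p a = true → q a = true)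
    {x : Int} (hx : x ∈ l) (hq : q x = true) (hp : p x = false) :
    l.countP p < l.countP q := by
  induction l with
  | nil => cases hx
  | cons a t ih =>
    rcases List.mem_cons.1 hx with rfl | hxt
    · simp [hp, hq]
      exact List.countP_mono_left (fun a _ => himp a)
    · simp only [List.countP_cons]
      have := ih hxt
      by_cases hpa : p a = true
      · simp [hpa, himp a hpa]; omega
      · simp only [Bool.not_eq_true] at hpa
        simp [hpa]
        by_cases hqa : q a = true <;> simp [hqa] <;> omega

theorem pvUnseen_append_le (graph : List (Int × List Int)) (vis e : List Int) :
    pvUnseen graph (vis ++ e) ≤ pvUnseen graph vis := by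
  unfold pvUnseen
  apply List.countP_mono_left
  intro a _ h
  simp only [List.contains_append, Bool.not_or, Bool.and_eq_true, Bool.not_eq_true'] at h
  simpa using h.1

theorem pvUnseen_append_lt (graph : List (Int × List Int)) {vis : List Int} {x : Int}
    (hx : x ∉ vis) (hk : x ∈ graph.map Prod.fst) :
    pvUnseen graph (vis ++ [x]) < pvUnseen graph vis := by
  unfold pvUnseen
  refine pvCountP_lt ?_ hk ?_ ?_
  · intro a h
    simp only [List.contains_append, Bool.not_or, Bool.and_eq_true, Bool.not_eq_true'] at h
    simpa using h.1
  · simp [hx]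
  · simp

theorem pvUnseen_append_eq (graph : List (Int × List Int)) (vis : List Int) {x : Int}
    (hk : x ∉ graph.map Prod.fst) :
    pvUnseen graph (vis ++ [x]) = pvUnseen graph vis := by
  unfold pvUnseen
  apply List.countP_congr
  intro a ha
  have hax : a ≠ x := by rintro rfl; exact hk ha
  simp [hax]

theorem pvNbrs_not_key {graph : List (Int × List Int)} {x : Int}
    (hk : x ∉ graph.map Prod.fst) : pvNbrs graph x = [] := by
  apply PySem.Dict.getD_of_not_contains
  unfold PySem.Dict.ofList
  have : ∀ (d : PySem.Dict Int (List Int)), d.contains x = false →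
      (d.update graph).contains x = false := by
    induction graph with
    | nil => intro d hd; simpa [PySem.Dict.update]
    | cons a t ih =>
      intro d hd
      simp only [List.map_cons, List.mem_cons, not_or] at hk
      simp only [PySem.Dict.update, List.foldl_cons]
      have := ih hk.2 (d.insert a.1 a.2) (by
        simp only [PySem.Dict.contains_insert, Bool.or_eq_false_iff]
        exact ⟨by simp only [beq_eq_false_iff_ne]; exact hk.1, hd⟩)
      simpa [PySem.Dict.update] using this
  exact this _ (by simp)

-- dfs's body, with `visited.add` / `path.append` fused: visiting n contributes the
-- newly-discovered vertices n :: (recursive part) to both visited and path, in order.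
def dfsVisitA (graph : List (Int × List Int)) (ns : List Int) (vis : List Int) : List Int :=
  match ns with
  | [] => []
  | n :: rest =>
    if hn : n ∈ vis then
      dfsVisitA graph rest vis
    else
      let d := n :: dfsVisitA graph (pvNbrs graph n) (PySem.Set.add vis n)
      d ++ dfsVisitA graph rest (vis ++ d)
termination_by (pvUnseen graph vis, ns.length)
decreasing_by
  · exact Prod.Lex.right _ (by simp only [List.length_cons]; omega)
  · rw [PySem.Set.add_of_not_mem hn]
    by_cases hk : n ∈ graph.map Prod.fst
    · exact Prod.Lex.left _ _ (pvUnseen_append_lt graph hn hk)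
    · rw [pvUnseen_append_eq graph vis hk, pvNbrs_not_key hk]
      exact Prod.Lex.right _ (by simp only [List.length_cons, List.length_nil]; omega)
  · show Prod.Lex (fun a₁ a₂ => a₁ < a₂) (fun a₁ a₂ => a₁ < a₂)
        (pvUnseen graph (vis ++ d), rest.length) (pvUnseen graph vis, (n :: rest).length)
    rcases Nat.lt_or_ge (pvUnseen graph (vis ++ d)) (pvUnseen graph vis) with h | h
    · exact Prod.Lex.left _ _ h
    · rw [le_antisymm (pvUnseen_append_le graph vis d) h]
      exact Prod.Lex.right _ (by simp only [List.length_cons]; omega)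

-- dfs(graph, vertex): visited = {vertex}, path = [vertex], then the neighbor loop.
def dfsA (graph : List (Int × List Int)) (vertex : Int) : List Int :=
  vertex :: dfsVisitA graph (pvNbrs graph vertex) [vertex]

-- the `for vi in v` loop of cicle_search (dict cicle, global visited set).
def csGoA (graph : List (Int × List Int)) (vs : List Int)
    (cicle : PySem.Dict Int (List Int)) (visited : List Int) : List (List Int) :=
  match vs with
  | [] => cicle.values          -- [c for c in cicle.values()]
  | vi :: rest =>
    if vi ∈ visited then csGoA graph rest cicle visited
    else
      let p := dfsA graph vi    -- cicle[vi] = dfs(graph, vi)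
      csGoA graph rest (cicle.insert vi p) (p.foldl PySem.Set.add visited)

def cicle_search (graph : List (Int × List Int)) (v : List Int) : List (List Int) :=
  csGoA graph v PySem.Dict.empty []

-- ===== PORT B =====
-- the while-loop of Source B: Python's list-as-stack is end-top with neighbors pushed in
-- REVERSED order; modeled head-top with neighbors in order — the same pop sequence.
def loopB (graph : List (Int × List Int)) (stack seen path : List Int) : List Int :=
  match stack with
  | [] => path
  | x :: rest =>
    if x ∈ seen then loopB graph rest seen path
    else loopB graph (pvNbrs graph x ++ rest) (PySem.Set.add seen x) (path ++ [x])
termination_by (pvUnseen graph seen, stack.length)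
decreasing_by
  · exact Prod.Lex.right _ (by simp only [List.length_cons]; omega)
  · rename_i hx
    rw [PySem.Set.add_of_not_mem hx]
    by_cases hk : x ∈ graph.map Prod.fst
    · exact Prod.Lex.left _ _ (pvUnseen_append_lt graph hx hk)
    · rw [pvUnseen_append_eq graph seen hk, pvNbrs_not_key hk]
      exact Prod.Lex.right _ (by simp only [List.length_append, List.length_nil, List.length_cons]; omega)

-- the `for vi in v` loop of Source B (plain list of paths, global visited set).
def csGoB (graph : List (Int × List Int)) (vs : List Int)
    (cycles : List (List Int)) (visited : List Int) : List (List Int) :=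
  match vs with
  | [] => cycles
  | vi :: rest =>
    if vi ∈ visited then csGoB graph rest cycles visited
    else
      let p := loopB graph [vi] [] []
      csGoB graph rest (cycles ++ [p]) (p.foldl PySem.Set.add visited)

def cicle_search_alt (graph : List (Int × List Int)) (v : List Int) : List (List Int) :=
  csGoB graph v [] []

-- ===== PRECONDITION & SPEC =====
def Spec_cicle_search (graph : List (Int × List Int)) (v : List Int) (out : List (List Int)) : Prop := out = cicle_search_alt graph v
instance (graph : List (Int × List Int)) (v : List Int) (out : List (List Int)) : Decidable (Spec_cicle_search graph v out) := by unfold Spec_cicle_search; infer_instance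

-- ===== CLAIM (what is proved, stated in full; the proofs are below) =====
def Claim_equal_cicle_search : Prop := ∀ (graph : List (Int × List Int)) (v : List Int), Dom_cicle_search graph v → Spec_cicle_search graph v (cicle_search graph v)

-- ===== LEMMAS AND PROOFS =====

-- Core invariant: running the stack loop on ns ++ rest first performs exactly the
-- recursive DFS of ns (extending seen and path by the same delta), then continues with rest.
theorem pvKey (graph : List (Int × List Int)) (ns rest vis path : List Int) :
    loopB graph (ns ++ rest) vis path =
      loopB graph rest (vis ++ dfsVisitA graph ns vis) (path ++ dfsVisitA graph ns vis) := by
  match ns with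
  | [] => simp [dfsVisitA]
  | n :: ns' =>
    by_cases h : n ∈ vis
    · rw [List.cons_append, loopB, if_pos h, dfsVisitA, dif_pos h]
      exact pvKey graph ns' rest vis path
    · rw [List.cons_append, loopB, if_neg h, dfsVisitA, dif_neg h,
          PySem.Set.add_of_not_mem h]
      have h1 := pvKey graph (pvNbrs graph n) (ns' ++ rest) (vis ++ [n]) (path ++ [n])
      rw [h1]
      have h2 := pvKey graph ns' rest
        (vis ++ [n] ++ dfsVisitA graph (pvNbrs graph n) (vis ++ [n]))
        (path ++ [n] ++ dfsVisitA graph (pvNbrs graph n) (vis ++ [n]))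
      rw [h2]
      simp [List.append_assoc]
termination_by (pvUnseen graph vis, ns.length)
decreasing_by
  · exact Prod.Lex.right _ (by simp only [List.length_cons]; omega)
  · by_cases hk : n ∈ graph.map Prod.fst
    · exact Prod.Lex.left _ _ (pvUnseen_append_lt graph h hk)
    · rw [pvUnseen_append_eq graph vis hk, pvNbrs_not_key hk]
      exact Prod.Lex.right _ (by simp only [List.length_nil, List.length_cons]; omega)
  · rcases Nat.lt_or_ge (pvUnseen graph (vis ++ [n] ++ dfsVisitA graph (pvNbrs graph n) (vis ++ [n]))) (pvUnseen graph vis) with hlt | hge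
    · exact Prod.Lex.left _ _ hlt
    · have hle : pvUnseen graph (vis ++ ([n] ++ dfsVisitA graph (pvNbrs graph n) (vis ++ [n]))) ≤ pvUnseen graph vis :=
        pvUnseen_append_le graph vis _
      rw [← List.append_assoc] at hle
      have heq := le_antisymm hle hge
      rw [heq]
      exact Prod.Lex.right _ (by simp only [List.length_cons]; omega)

-- A single DFS run: the iterative loop started on [x] equals the recursive dfs path.
theorem pvDfs_eq (graph : List (Int × List Int)) (x : Int) :
    loopB graph [x] [] [] = dfsA graph x := by
  have h0 : loopB graph [x] [] [] =
      loopB graph (pvNbrs graph x ++ []) [x] [x] := by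
    rw [loopB, if_neg (List.not_mem_nil), PySem.Set.add_of_not_mem (List.not_mem_nil)]
    rfl
  rw [h0, pvKey graph (pvNbrs graph x) [] [x] [x], loopB, dfsA]
  rfl

theorem pvValues_insert (d : PySem.Dict Int (List Int)) (k : Int) (p : List Int)
    (h : d.contains k = false) : (d.insert k p).values = d.values ++ [p] := by
  simp [PySem.Dict.insert, h, PySem.Dict.values]

theorem pvMem_foldl_add (l : List Int) (s : List Int) (x : Int) :
    x ∈ l.foldl PySem.Set.add s ↔ x ∈ s ∨ x ∈ l := by
  induction l generalizing s with
  | nil => simp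
  | cons a t ih =>
    rw [List.foldl_cons, ih]
    simp [PySem.Set.mem_add]
    tauto

-- The outer loops agree, given that the dict's values are exactly the collected list
-- and every dict key is already in the global visited set.
theorem pvOuter (graph : List (Int × List Int)) (vs : List Int)
    (cicle : PySem.Dict Int (List Int)) (cycles : List (List Int)) (visited : List Int)
    (hv : cicle.values = cycles) (hk : ∀ k, cicle.contains k = true → k ∈ visited) :
    csGoA graph vs cicle visited = csGoB graph vs cycles visited := by
  induction vs generalizing cicle cycles visited with
  | nil => rw [csGoA, csGoB, hv]
  | cons vi rest ih =>
    by_cases h : vi ∈ visited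
    · rw [csGoA, if_pos h, csGoB, if_pos h]
      exact ih cicle cycles visited hv hk
    · rw [csGoA, if_neg h, csGoB, if_neg h]
      have hc : cicle.contains vi = false := by
        cases hcv : cicle.contains vi
        · rfl
        · exact absurd (hk _ hcv) h
      rw [pvDfs_eq]
      apply ih
      · rw [pvValues_insert _ _ _ hc, hv]
      · intro k hkc
        rw [PySem.Dict.contains_insert] at hkc
        rw [pvMem_foldl_add]
        rcases Bool.or_eq_true_iff.1 hkc with hkvi | hold
        · right
          have : k = vi := by simpa using hkvi
          rw [this, dfsA]
          exact List.mem_cons_self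
        · exact Or.inl (hk _ hold)

-- ===== VERDICT (by name: the statement is the Claim_ definition above) =====
theorem cicle_search_spec : Claim_equal_cicle_search := by
  intro graph v _
  unfold Spec_cicle_search cicle_search cicle_search_alt
  exact pvOuter graph v PySem.Dict.empty [] [] rfl (by intro k hk; simp at hk)
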